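-- pv_equiv track=rewrite | github.com/kiriwalawren/nixflix | docs/generator/split-options.py | categorize_options_hierarchical
-- ===== SOURCE A (Python) =====
-- from typing import Dict, List, Any, Set
-- from collections import defaultdict
--
-- def find_common_parent_groups(options: Dict[str, Any]) -> Dict[str, Set[str]]:
--     """Find which option paths have multiple children (complex objects)"""
--     service_paths = defaultdict(lambda: defaultdict(int))
--
--     for name in options.keys():
--         if not name.startswith("nixflix."):
--             continue
--
--         parts = name.split(".")
--         if len(parts) < 4:
--             continue
--
--         service = parts[1]
--         # Count how many options exist under each path prefix
--         for i in range(3, len(parts)):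
--             # Skip '*' and '<name>' parts when building the prefix
--             prefix_parts = [p for p in parts[2:i] if p not in ("*", "<name>")]
--             if prefix_parts:
--                 prefix = ".".join(prefix_parts)
--                 service_paths[service][prefix] += 1
--
--     # Paths with multiple children become pages
--     complex_groups = defaultdict(set)
--     for service, paths in service_paths.items():
--         for path, count in paths.items():
--             if count >= 3:  # Threshold: groups with 3+ sub-options get their own page
--                 complex_groups[service].add(path)
--
--     return complex_groups
--
-- def discover_services(options: Dict[str, Any]) -> List[str]:
--     """Automatically discover all services from the options"""
--     services = set()
--     for name in options.keys():
--         if not name.startswith("nixflix."):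
--             continue
--         parts = name.split(".")
--         if len(parts) >= 2:
--             service = parts[1]
--             services.add(service)
--
--     # Sort services alphabetically for consistent ordering
--     return sorted(services)
--
-- def categorize_options_hierarchical(
--     options: Dict[str, Any],
-- ) -> Dict[str, Dict[str, List[tuple]]]:
--     services = discover_services(options)
--
--     complex_groups = find_common_parent_groups(options)
--     categorized = defaultdict(lambda: defaultdict(list))
--
--     for name, opt in options.items():
--         if not name.startswith("nixflix."):
--             continue
--
--         parts = name.split(".")
--
--         if len(parts) == 2:
--             categorized["core"]["index"].append((name, opt))
--             continue
--
--         service = parts[1]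
--
--         if service not in services:
--             categorized["core"]["index"].append((name, opt))
--             continue
--
--         # Get the option path without the "nixflix.{service}." prefix
--         # Filter out '*' and '<name>' parts to match how complex_groups are built
--         option_path_parts = [p for p in parts[2:] if p not in ("*", "<name>")]
--         option_path = ".".join(option_path_parts) if option_path_parts else None
--
--         # Check if this exact option path is a complex group (parent option)
--         if option_path and option_path in complex_groups[service]:
--             categorized[service][option_path].append((name, opt))
--         else:
--             # Find the deepest complex group this option belongs to
--             page_key = "index"
--             for i in range(3, len(parts)):
--                 # Skip '*' and '<name>' parts when building the prefix
--                 prefix_parts = [p for p in parts[2:i] if p not in ("*", "<name>")]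
--                 if prefix_parts:
--                     prefix = ".".join(prefix_parts)
--                     if prefix in complex_groups[service]:
--                         page_key = prefix
--
--             if page_key == "index":
--                 categorized[service]["index"].append((name, opt))
--             else:
--                 categorized[service][page_key].append((name, opt))
--
--     return categorized
-- ===== SOURCE B (Python) =====
-- from collections import defaultdict
--
--
-- def categorize_options_hierarchical(options):
--     # Pass 1: split each option name once; cache (nparts, service, chain, full)
--     # per name and emit every (service, proper-prefix) occurrence into one
--     # flat list.  chain = the nonempty '*'/'<name>'-filtered proper prefixes.
--     occ = []
--     meta = {}
--     for name in options:
--         if not name.startswith("nixflix."):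
--             continue
--         parts = name.split(".")
--         service = parts[1]
--         tail = parts[2:]
--         chain = []
--         filt = []
--         for p in tail[:-1]:
--             if p not in ("*", "<name>"):
--                 filt.append(p)
--             if filt:
--                 chain.append(".".join(filt))
--         for c in chain:
--             occ.append((service, c))
--         if tail and tail[-1] not in ("*", "<name>"):
--             filt.append(tail[-1])
--         meta[name] = (len(parts), service, chain, ".".join(filt))
--
--     # Pass 2: sort the occurrence list and harvest the keys of runs of
--     # length >= 3 -- sort-then-scan instead of dictionary counting.
--     occ.sort()
--     pages = set()
--     rest = occ
--     while rest:
--         key, k = rest[0], 1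
--         while k < len(rest) and rest[k] == key:
--             k += 1
--         if k >= 3:
--             pages.add(key)
--         rest = rest[k:]
--
--     # Pass 3: place each option from its cached meta: the full filtered path
--     # if it is a page, else the deepest page among its proper prefixes.
--     categorized = defaultdict(lambda: defaultdict(list))
--     for name, opt in options.items():
--         if name not in meta:
--             continue
--         nparts, service, chain, full = meta[name]
--         if nparts == 2:
--             categorized["core"]["index"].append((name, opt))
--             continue
--         if full and (service, full) in pages:
--             page = full
--         else:
--             page = next((c for c in reversed(chain) if (service, c) in pages), "index")
--         categorized[service][page].append((name, opt))
--
--     return categorized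
-- ===== Notes on version B (the rewrite author's own statement) =====
-- stated objective: alternative
-- what changed: B finds the >=3-count prefix pages by sort-then-scan over one flat (service, prefix) occurrence list -- sorting it and harvesting the keys of runs of length >= 3 -- instead of A's per-service counting dictionaries materialised into per-service sets, drops the discover_services sorted-set machinery (a 3+-part nixflix option's service is always its own parts[1]), and splits each name once into a cached meta record instead of recomputing filtered prefix slices in the placement loop.
import Mathlib
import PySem

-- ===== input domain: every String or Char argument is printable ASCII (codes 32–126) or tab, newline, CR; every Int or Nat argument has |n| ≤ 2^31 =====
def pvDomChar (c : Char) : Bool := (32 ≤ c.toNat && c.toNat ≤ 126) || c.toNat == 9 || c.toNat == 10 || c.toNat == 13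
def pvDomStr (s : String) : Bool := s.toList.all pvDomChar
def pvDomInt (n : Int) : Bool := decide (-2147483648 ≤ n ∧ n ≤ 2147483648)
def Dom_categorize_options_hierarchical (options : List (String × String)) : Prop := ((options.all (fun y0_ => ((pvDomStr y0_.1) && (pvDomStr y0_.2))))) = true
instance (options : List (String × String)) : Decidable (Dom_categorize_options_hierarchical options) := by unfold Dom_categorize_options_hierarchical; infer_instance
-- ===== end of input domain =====

-- B replaces A's per-service count dictionaries and materialised complex-group sets by a
-- sort-then-scan: one flat occurrence list, sorted, with the ≥3-runs harvested as pages,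
-- plus a per-name meta cache so each name is split once (objective: alternative).

-- ===== PORT A =====

-- shared primitives of both Pythons: name.split("."), name.startswith("nixflix."),
-- parts[1], parts[2:], the '*'/'<name>' filter, and the defaultdict append
def pvParts (name : String) : List String := (PySem.Str.split? name ".").getD []
def pvIsNix (name : String) : Bool := PySem.Str.startswith name "nixflix."
def pvKeep (p : String) : Bool := !(p == "*" || p == "<name>")
def pvServiceOf (name : String) : String := PySem.List.pyGetD (pvParts name) 1 ""
def pvTail (name : String) : List String := PySem.List.slice (pvParts name) (some 2) none
-- categorized[service][page].append((name, opt)) on a defaultdict(lambda: defaultdict(list))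
def pvAppend (cat : PySem.Dict String (PySem.Dict String (List (String × String))))
    (s page : String) (kv : String × String) :
    PySem.Dict String (PySem.Dict String (List (String × String))) :=
  cat.insert s ((cat.getD s PySem.Dict.empty).insert page
    ((cat.getD s PySem.Dict.empty).getD page [] ++ [kv]))

-- A: 'if page_key == "index": …["index"].append(…) else: …[page_key].append(…)'
def pvAppendPage (cat : PySem.Dict String (PySem.Dict String (List (String × String))))
    (service pageKey : String) (kv : String × String) :
    PySem.Dict String (PySem.Dict String (List (String × String))) :=
  if pageKey == "index" then pvAppend cat service "index" kv
  else pvAppend cat service pageKey kv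

-- A: inner loop of find_common_parent_groups: for i in range(3, len(parts)):
--    prefix_parts = [p for p in parts[2:i] if p not in ("*", "<name>")]; if prefix_parts: …[service][prefix] += 1
def pvCountLoopA (service : String) (parts : List String)
    (d : PySem.Dict String (PySem.Dict String Int)) : PySem.Dict String (PySem.Dict String Int) :=
  (PySem.List.pyRange 3 (parts.length : Int) 1).foldl (fun acc i =>
    let pp := (PySem.List.slice parts (some 2) (some i)).filter pvKeep
    if pp.isEmpty then acc
    else (fun (d : PySem.Dict String (PySem.Dict String Int)) (s : String) =>
            d.insert service ((d.getD service PySem.Dict.empty).modify s 0 (· + 1)))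
         acc (PySem.Str.join "." pp)) d

-- A: per-name body of find_common_parent_groups' first loop
def pvSPStep (d : PySem.Dict String (PySem.Dict String Int)) (kv : String × String) :
    PySem.Dict String (PySem.Dict String Int) :=
  if pvIsNix kv.1 then
    if (pvParts kv.1).length < 4 then d
    else pvCountLoopA (pvServiceOf kv.1) (pvParts kv.1) d
  else d

def pvServicePaths (items : List (String × String)) : PySem.Dict String (PySem.Dict String Int) :=
  items.foldl pvSPStep PySem.Dict.empty

-- A: complex_groups: for path, count in paths.items(): if count >= 3: complex_groups[service].add(path)
def pvCGInnerStep (sname : String) (cg : PySem.Dict String (PySem.Set String))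
    (pc : String × Int) : PySem.Dict String (PySem.Set String) :=
  if 3 ≤ pc.2 then cg.insert sname (PySem.Set.add (cg.getD sname PySem.Set.empty) pc.1)
  else cg

def pvCGStep (cg : PySem.Dict String (PySem.Set String))
    (sp : String × PySem.Dict String Int) : PySem.Dict String (PySem.Set String) :=
  sp.2.items.foldl (pvCGInnerStep sp.1) cg

def pvComplexGroups (items : List (String × String)) : PySem.Dict String (PySem.Set String) :=
  (pvServicePaths items).items.foldl pvCGStep PySem.Dict.empty

-- A: discover_services
def pvDSStep (s : PySem.Set String) (kv : String × String) : PySem.Set String :=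
  if pvIsNix kv.1 then
    if 2 ≤ (pvParts kv.1).length then PySem.Set.add s (pvServiceOf kv.1) else s
  else s

def pvDiscoverServices (items : List (String × String)) : List String :=
  PySem.List.sorted (items.foldl pvDSStep PySem.Set.empty) (fun x => x) false

-- A: the page_key loop: for i in range(3, len(parts)): … if prefix in complex_groups[service]: page_key = prefix
def pvPageLoopA (cg : PySem.Set String) (parts : List String) : String :=
  (PySem.List.pyRange 3 (parts.length : Int) 1).foldl (fun pk i =>
    let pp := (PySem.List.slice parts (some 2) (some i)).filter pvKeep
    if pp.isEmpty then pk
    else (fun (pk : String) (s : String) => if PySem.Set.contains cg s then s else pk)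
         pk (PySem.Str.join "." pp)) "index"

-- A: per-name body of the categorisation loop ('if option_path and … in …' as nested ifs)
def pvPlaceA (services : List String) (cgAll : PySem.Dict String (PySem.Set String))
    (cat : PySem.Dict String (PySem.Dict String (List (String × String))))
    (kv : String × String) : PySem.Dict String (PySem.Dict String (List (String × String))) :=
  if pvIsNix kv.1 then
    if (pvParts kv.1).length == 2 then pvAppend cat "core" "index" kv
    else if services.contains (pvServiceOf kv.1) then
      if ((pvTail kv.1).filter pvKeep).isEmpty then
        pvAppendPage cat (pvServiceOf kv.1)
          (pvPageLoopA (cgAll.getD (pvServiceOf kv.1) PySem.Set.empty) (pvParts kv.1)) kv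
      else if PySem.Str.join "." ((pvTail kv.1).filter pvKeep) != "" then
        if PySem.Set.contains (cgAll.getD (pvServiceOf kv.1) PySem.Set.empty)
             (PySem.Str.join "." ((pvTail kv.1).filter pvKeep)) then
          pvAppend cat (pvServiceOf kv.1) (PySem.Str.join "." ((pvTail kv.1).filter pvKeep)) kv
        else
          pvAppendPage cat (pvServiceOf kv.1)
            (pvPageLoopA (cgAll.getD (pvServiceOf kv.1) PySem.Set.empty) (pvParts kv.1)) kv
      else
        pvAppendPage cat (pvServiceOf kv.1)
          (pvPageLoopA (cgAll.getD (pvServiceOf kv.1) PySem.Set.empty) (pvParts kv.1)) kv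
    else pvAppend cat "core" "index" kv
  else cat

def categorize_options_hierarchical (options : List (String × String)) :
    List (String × List (String × List (String × String))) :=
  (((PySem.Dict.ofList options).items).foldl
      (pvPlaceA (pvDiscoverServices ((PySem.Dict.ofList options).items))
                (pvComplexGroups ((PySem.Dict.ofList options).items)))
      PySem.Dict.empty).items.map (fun sp => (sp.1, sp.2.items))

-- ===== PORT B =====

-- B pass 1 per name: meta = (len(parts), service, chain, full) with chain built by
-- one incremental filter walk over tail[:-1]
def pvMetaOf (name : String) : Int × String × List String × String :=
  let parts := pvParts name
  let tl := pvTail name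
  let st := (PySem.List.slice tl none (some (-1))).foldl
    (fun (st : List String × List String) p =>
      let filt := if pvKeep p then st.2 ++ [p] else st.2
      (if filt.isEmpty then st.1 else st.1 ++ [PySem.Str.join "." filt], filt)) ([], [])
  let filt2 :=
    if tl.isEmpty then st.2
    else if pvKeep (PySem.List.pyGetD tl (-1) "") then st.2 ++ [PySem.List.pyGetD tl (-1) ""]
    else st.2
  ((parts.length : Int), pvServiceOf name, st.1, PySem.Str.join "." filt2)

-- B pass 1 per item: extend the flat occurrence list and record meta[name]
def pvP1Step
    (st : List (String × String) × PySem.Dict String (Int × String × List String × String))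
    (kv : String × String) :
    List (String × String) × PySem.Dict String (Int × String × List String × String) :=
  if pvIsNix kv.1 then
    let m := pvMetaOf kv.1
    (st.1 ++ m.2.2.1.map (fun c => (m.2.1, c)), st.2.insert kv.1 m)
  else st

def pvPass1 (items : List (String × String)) :
    List (String × String) × PySem.Dict String (Int × String × List String × String) :=
  items.foldl pvP1Step ([], PySem.Dict.empty)

-- B pass 2: run-length scan of the sorted occurrence list (the two while loops)
def pvRunScan (pages : PySem.Set (String × String)) :
    List (String × String) → PySem.Set (String × String)
  | [] => pages
  | x :: t =>
      pvRunScan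
        (if 3 ≤ 1 + (t.takeWhile (fun y => y == x)).length then PySem.Set.add pages x else pages)
        (t.dropWhile (fun y => y == x))
  termination_by l => l.length
  decreasing_by
    simpa using Nat.lt_succ_of_le (List.length_dropWhile_le (fun y => y == x) t)

-- B: occ.sort() on 2-tuples, then the scan
def pvPages (occ : List (String × String)) : PySem.Set (String × String) :=
  pvRunScan PySem.Set.empty (PySem.List.sorted2 occ Prod.fst Prod.snd false)

-- B pass 3 per item
def pvPlaceB (mta : PySem.Dict String (Int × String × List String × String))
    (pages : PySem.Set (String × String))
    (cat : PySem.Dict String (PySem.Dict String (List (String × String))))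
    (kv : String × String) : PySem.Dict String (PySem.Dict String (List (String × String))) :=
  match mta.get? kv.1 with
  | none => cat
  | some m =>
      if m.1 == 2 then pvAppend cat "core" "index" kv
      else if (m.2.2.2 != "") && PySem.Set.contains pages (m.2.1, m.2.2.2) then
        pvAppend cat m.2.1 m.2.2.2 kv
      else
        pvAppend cat m.2.1
          ((m.2.2.1.reverse.find?
              (fun c => PySem.Set.contains pages (m.2.1, c))).getD "index") kv

def categorize_options_hierarchical_alt (options : List (String × String)) :
    List (String × List (String × List (String × String))) :=
  (((PySem.Dict.ofList options).items).foldl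
      (pvPlaceB (pvPass1 ((PySem.Dict.ofList options).items)).2
                (pvPages (pvPass1 ((PySem.Dict.ofList options).items)).1))
      PySem.Dict.empty).items.map (fun sp => (sp.1, sp.2.items))

-- ===== PRECONDITION & SPEC =====
def Spec_categorize_options_hierarchical (options : List (String × String)) (out : List (String × List (String × List (String × String)))) : Prop := out = categorize_options_hierarchical_alt options
instance (options : List (String × String)) (out : List (String × List (String × List (String × String)))) : Decidable (Spec_categorize_options_hierarchical options out) := by unfold Spec_categorize_options_hierarchical; infer_instance

-- ===== CLAIM (what is proved, stated in full; the proofs are below) =====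
def Claim_equal_categorize_options_hierarchical : Prop := ∀ (options : List (String × String)), Dom_categorize_options_hierarchical options → Spec_categorize_options_hierarchical options (categorize_options_hierarchical options)

-- ===== LEMMAS AND PROOFS =====

theorem pvJoin_nil : PySem.Str.join "." ([] : List String) = "" := rfl

-- the (possibly repeating) list of nonempty filtered proper prefixes of l, in order
def pvPfxs (l : List String) : List String :=
  (List.range l.length).filterMap (fun j =>
    let pp := (l.take (j+1)).filter pvKeep
    if pp.isEmpty then none else some (PySem.Str.join "." pp))

theorem pvPfxs_append (l : List String) (x : String) :
    pvPfxs (l ++ [x]) = pvPfxs l ++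
      (if ((l ++ [x]).filter pvKeep).isEmpty then []
       else [PySem.Str.join "." ((l ++ [x]).filter pvKeep)]) := by
  unfold pvPfxs
  rw [List.length_append, List.length_singleton, List.range_succ, List.filterMap_append]
  congr 1
  · exact List.filterMap_congr (fun j hj => by
      have hle : j + 1 ≤ l.length := List.mem_range.mp hj
      rw [List.take_append_of_le_length hle])
  · have ht : (l ++ [x]).take (l.length + 1) = l ++ [x] := by
      apply List.take_of_length_le; simp
    simp only [List.filterMap_cons, List.filterMap_nil, ht]
    by_cases he : ((l ++ [x]).filter pvKeep).isEmpty
    · rw [if_pos he, if_pos he]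
    · rw [if_neg he, if_neg he]

theorem pvRangeFold_eq {α : Type} (step : α → String → α) (l : List String) (a : α) :
    (List.range l.length).foldl (fun acc j =>
        let pp := (l.take (j+1)).filter pvKeep
        if pp.isEmpty then acc else step acc (PySem.Str.join "." pp)) a
      = (pvPfxs l).foldl step a := by
  induction l using List.reverseRecOn generalizing a with
  | nil => rfl
  | append_singleton l x ih =>
      rw [List.length_append, List.length_singleton, List.range_succ, List.foldl_append,
          pvPfxs_append, List.foldl_append]
      have hcong : (List.range l.length).foldl (fun acc j =>
            let pp := ((l ++ [x]).take (j+1)).filter pvKeep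
            if pp.isEmpty then acc else step acc (PySem.Str.join "." pp)) a
          = (List.range l.length).foldl (fun acc j =>
            let pp := (l.take (j+1)).filter pvKeep
            if pp.isEmpty then acc else step acc (PySem.Str.join "." pp)) a := by
        refine PySem.List.foldl_congr_mem _ _ _ a (fun acc j hj => ?_)
        have hle : j + 1 ≤ l.length := List.mem_range.mp hj
        simp only [List.take_append_of_le_length hle]
      rw [hcong, ih]
      have ht : (l ++ [x]).take (l.length + 1) = l ++ [x] := by
        apply List.take_of_length_le; simp
      simp only [List.foldl_cons, List.foldl_nil, ht]
      by_cases he : ((l ++ [x]).filter pvKeep).isEmpty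
      · rw [if_pos he, if_pos he]; rfl
      · rw [if_neg he, if_neg he]; rfl

theorem pvIncrFold_eq {α : Type} (step : α → String → α) (l : List String) (a : α) :
    l.foldl (fun (st : α × List String) p =>
        let filt := if pvKeep p then st.2 ++ [p] else st.2
        (if filt.isEmpty then st.1 else step st.1 (PySem.Str.join "." filt), filt)) (a, [])
      = ((pvPfxs l).foldl step a, l.filter pvKeep) := by
  induction l using List.reverseRecOn with
  | nil => rfl
  | append_singleton l x ih =>
      rw [List.foldl_append, ih, pvPfxs_append, List.foldl_append]
      have hfx : (l ++ [x]).filter pvKeep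
          = l.filter pvKeep ++ (if pvKeep x then [x] else []) := by
        rw [List.filter_append]
        by_cases hk : pvKeep x <;> simp [hk, List.filter]
      simp only [List.foldl_cons, List.foldl_nil]
      by_cases hk : pvKeep x
      · have hfx' : (l ++ [x]).filter pvKeep = l.filter pvKeep ++ [x] := by
          rw [hfx, if_pos hk]
        have hne : ((l ++ [x]).filter pvKeep).isEmpty = false := by
          rw [hfx']; simp
        rw [if_pos hk, hfx', if_neg (by simp)]
        rw [hfx'] at hne
        simp
      · have hfx' : (l ++ [x]).filter pvKeep = l.filter pvKeep := by
          rw [hfx, if_neg hk]; simp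
        rw [if_neg hk, hfx']
        by_cases he : (l.filter pvKeep).isEmpty
        · rw [if_pos he, if_pos he]; rfl
        · rw [if_neg he, if_neg he]; rfl

-- ---- slice / indexing bridges ----

theorem pvSliceDropLast {α : Type} (xs : List α) :
    PySem.List.slice xs none (some (-1)) = xs.dropLast := by
  simp only [PySem.List.slice, PySem.List.clampIdx]
  cases xs with
  | nil => simp
  | cons y ys =>
      rw [if_pos (by norm_num : (-1:Int) < 0),
          if_neg (show ¬ (((y :: ys).length : Int) + -1 < 0) by
            simp only [List.length_cons]; omega)]
      simp only [List.drop_zero, Nat.sub_zero, List.dropLast_eq_take]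
      congr 1
      omega

theorem pvGetLastConcat (l : List String) (y : String) :
    PySem.List.pyGetD (l ++ [y]) (-1) "" = y := by
  simp only [PySem.List.pyGetD, PySem.List.pyGet?, PySem.List.pyIdx?]
  have hc2 : -(((l ++ [y]).length : Int)) ≤ -1 := by
    simp only [List.length_append, List.length_cons, List.length_nil]
    omega
  rw [if_neg (by norm_num : ¬ ((0:Int) ≤ -1)), if_pos hc2]
  simp

theorem pvTail_eq (name : String) : pvTail name = (pvParts name).drop 2 := by
  unfold pvTail
  rw [PySem.List.slice_from (pvParts name) (by norm_num)]
  rfl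

theorem pvARange_eq {α : Type} (step : α → String → α) (parts : List String) (a : α) :
    (PySem.List.pyRange 3 (parts.length : Int) 1).foldl (fun acc i =>
        let pp := (PySem.List.slice parts (some 2) (some i)).filter pvKeep
        if pp.isEmpty then acc else step acc (PySem.Str.join "." pp)) a
      = (pvPfxs ((parts.drop 2).dropLast)).foldl step a := by
  rw [PySem.List.pyRange_one, List.foldl_map]
  rw [← pvRangeFold_eq step ((parts.drop 2).dropLast) a]
  have hlen : ((parts.length : Int) - 3).toNat = ((parts.drop 2).dropLast).length := by
    simp only [List.length_dropLast, List.length_drop]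
    omega
  rw [hlen]
  refine PySem.List.foldl_congr_mem _ _ _ a (fun acc j hj => ?_)
  have hj' : j < ((parts.drop 2).dropLast).length := List.mem_range.mp hj
  simp only [List.length_dropLast, List.length_drop] at hj'
  have h1 : PySem.List.slice parts (some 2) (some ((3:Int) + (j:Nat))) = (parts.drop 2).take (j+1) := by
    rw [PySem.List.slice_toNat parts (by norm_num) (by positivity)]
    congr 1
    omega
  have h2 : (parts.drop 2).take (j+1) = ((parts.drop 2).dropLast).take (j+1) := by
    rw [List.dropLast_eq_take, List.take_take]
    have : j + 1 ≤ (parts.drop 2).length - 1 := by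
      simp only [List.length_drop]
      omega
    rw [min_eq_left this]
  simp only [h1, h2]

-- ---- A's nested counting dict versus B's flat occurrence list ----

def pvPwC (dn : PySem.Dict String (PySem.Dict String Int))
    (occ : List (String × String)) : Prop :=
  ∀ s p, (dn.getD s PySem.Dict.empty).getD p 0 = (occ.count (s, p) : Int)

theorem pvPwC_step (service q : String) (dn : PySem.Dict String (PySem.Dict String Int))
    (occ : List (String × String)) (h : pvPwC dn occ) :
    pvPwC (dn.insert service ((dn.getD service PySem.Dict.empty).modify q 0 (· + 1)))
          (occ ++ [(service, q)]) := by
  intro s p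
  rw [PySem.Dict.getD_insert, List.count_append]
  by_cases hs : s = service
  · subst hs
    rw [if_pos rfl, PySem.Dict.getD_modify]
    by_cases hp : p = q
    · subst hp
      rw [if_pos rfl, h s p]
      have hc : List.count (s, p) [(s, p)] = 1 := by simp
      rw [hc]
      push_cast
      ring
    · rw [if_neg hp, h s p]
      have hc : List.count (s, p) [(s, q)] = 0 :=
        List.count_eq_zero.mpr (by simp [hp])
      rw [hc]
      simp
  · rw [if_neg hs, h s p]
    have hc : List.count (s, p) [(service, q)] = 0 :=
      List.count_eq_zero.mpr (by simp [hs])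
    rw [hc]
    simp

theorem pvPwC_fold (service : String) (ks : List String) :
    ∀ dn occ, pvPwC dn occ →
      pvPwC (ks.foldl (fun (d : PySem.Dict String (PySem.Dict String Int)) (s : String) =>
              d.insert service ((d.getD service PySem.Dict.empty).modify s 0 (· + 1))) dn)
            (occ ++ ks.map (fun c => (service, c))) := by
  induction ks with
  | nil =>
      intro dn occ h
      simpa using h
  | cons q t ih =>
      intro dn occ h
      simp only [List.foldl_cons, List.map_cons]
      have h1 := pvPwC_step service q dn occ h
      have h2 := ih _ _ h1
      have heq : (occ ++ [(service, q)]) ++ t.map (fun c => (service, c))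
          = occ ++ ((service, q) :: t.map (fun c => (service, c))) := by
        simp
      rw [heq] at h2
      exact h2

-- ---- B's meta in closed form ----

theorem pvFull_aux (tl : List String) :
    (if tl.isEmpty then tl.dropLast.filter pvKeep
     else if pvKeep (PySem.List.pyGetD tl (-1) "") then
       tl.dropLast.filter pvKeep ++ [PySem.List.pyGetD tl (-1) ""]
     else tl.dropLast.filter pvKeep) = tl.filter pvKeep := by
  induction tl using List.reverseRecOn with
  | nil => rfl
  | append_singleton l y _ =>
      rw [if_neg (by simp), pvGetLastConcat, List.dropLast_concat, List.filter_append]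
      by_cases hk : pvKeep y <;> simp [hk, List.filter]

theorem pvMetaOf_eq (name : String) :
    pvMetaOf name = (((pvParts name).length : Int), pvServiceOf name,
      pvPfxs (((pvParts name).drop 2).dropLast),
      PySem.Str.join "." (((pvParts name).drop 2).filter pvKeep)) := by
  simp only [pvMetaOf]
  rw [pvTail_eq, pvSliceDropLast,
      pvIncrFold_eq (fun (a : List String) s => a ++ [s]) (((pvParts name).drop 2).dropLast) []]
  rw [PySem.List.foldl_append_singleton_eq_self, List.nil_append]
  rw [show (((pvParts name).drop 2).dropLast).filter pvKeep
        = (((pvParts name).drop 2)).dropLast.filter pvKeep from rfl]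
  rw [pvFull_aux ((pvParts name).drop 2)]

-- A's inner counting loop in pvPfxs form
theorem pvCountLoopA_eq (service : String) (parts : List String)
    (dn : PySem.Dict String (PySem.Dict String Int)) :
    pvCountLoopA service parts dn
      = (pvPfxs ((parts.drop 2).dropLast)).foldl
          (fun (d : PySem.Dict String (PySem.Dict String Int)) (s : String) =>
            d.insert service ((d.getD service PySem.Dict.empty).modify s 0 (· + 1))) dn := by
  unfold pvCountLoopA
  exact pvARange_eq (fun (d : PySem.Dict String (PySem.Dict String Int)) (s : String) =>
    d.insert service ((d.getD service PySem.Dict.empty).modify s 0 (· + 1))) parts dn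

-- ---- pass 1: the occurrence-list count equals A's nested count ----

theorem pvCounts_occ (items : List (String × String)) :
    pvPwC (pvServicePaths items) (pvPass1 items).1 := by
  unfold pvServicePaths pvPass1
  have H : ∀ (l : List (String × String)) dn
      (st : List (String × String) × PySem.Dict String (Int × String × List String × String)),
      pvPwC dn st.1 → pvPwC (l.foldl pvSPStep dn) (l.foldl pvP1Step st).1 := by
    intro l
    induction l with
    | nil => intro dn st h; exact h
    | cons kv t ih =>
        intro dn st h
        simp only [List.foldl_cons]
        refine ih _ _ ?_
        unfold pvSPStep pvP1Step
        by_cases hn : pvIsNix kv.1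
        · rw [if_pos hn, if_pos hn]
          simp only [pvMetaOf_eq]
          by_cases h4 : (pvParts kv.1).length < 4
          · rw [if_pos h4]
            have hz : (((pvParts kv.1).drop 2).dropLast) = [] := by
              apply List.eq_nil_of_length_eq_zero
              simp only [List.length_dropLast, List.length_drop]
              omega
            rw [hz, show pvPfxs [] = [] from rfl]
            simpa using h
          · rw [if_neg h4, pvCountLoopA_eq]
            exact pvPwC_fold _ _ dn st.1 h
        · rw [if_neg hn, if_neg hn]
          exact h
  exact H _ _ ([], PySem.Dict.empty) (fun s p => by
    rw [PySem.Dict.getD_empty, PySem.Dict.getD_empty]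
    simp)

-- ---- pass 1: the meta dict ----

theorem pvMeta_keep (items : List (String × String)) (n : String)
    (st : List (String × String) × PySem.Dict String (Int × String × List String × String))
    (h : st.2.get? n = some (pvMetaOf n)) :
    ((items.foldl pvP1Step st).2).get? n = some (pvMetaOf n) := by
  induction items generalizing st with
  | nil => exact h
  | cons kv t ih =>
      simp only [List.foldl_cons]
      refine ih _ ?_
      unfold pvP1Step
      by_cases hn : pvIsNix kv.1
      · rw [if_pos hn]
        by_cases hk : kv.1 = n
        · subst hk
          exact PySem.Dict.get?_insert_self _ _ _
        · rw [PySem.Dict.get?_insert_of_ne _ _ (fun hx => hk hx.symm)]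
          exact h
      · rw [if_neg hn]
        exact h

theorem pvMeta_get_some (items : List (String × String)) (kv : String × String)
    (hkv : kv ∈ items) (hn : pvIsNix kv.1 = true) :
    ((pvPass1 items).2).get? kv.1 = some (pvMetaOf kv.1) := by
  unfold pvPass1
  have H : ∀ (l : List (String × String))
      (st : List (String × String) × PySem.Dict String (Int × String × List String × String)),
      kv ∈ l → ((l.foldl pvP1Step st).2).get? kv.1 = some (pvMetaOf kv.1) := by
    intro l
    induction l with
    | nil => intro st hm; cases hm
    | cons hd t ih =>
        intro st hm
        simp only [List.foldl_cons]
        rcases List.mem_cons.mp hm with hm | hm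
        · subst hm
          refine pvMeta_keep t _ _ ?_
          unfold pvP1Step
          rw [if_pos hn]
          exact PySem.Dict.get?_insert_self _ _ _
        · exact ih _ hm
  exact H items _ hkv

theorem pvMeta_get_none (items : List (String × String)) (n : String)
    (hn : pvIsNix n = false) :
    ((pvPass1 items).2).get? n = none := by
  unfold pvPass1
  have H : ∀ (l : List (String × String))
      (st : List (String × String) × PySem.Dict String (Int × String × List String × String)),
      st.2.get? n = none → ((l.foldl pvP1Step st).2).get? n = none := by
    intro l
    induction l with
    | nil => intro st h; exact h
    | cons kv t ih =>
        intro st h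
        simp only [List.foldl_cons]
        refine ih _ ?_
        unfold pvP1Step
        by_cases hx : pvIsNix kv.1
        · rw [if_pos hx]
          have hne : n ≠ kv.1 := by
            intro he
            rw [he, hx] at hn
            cases hn
          rw [PySem.Dict.get?_insert_of_ne _ _ hne]
          exact h
        · rw [if_neg hx]
          exact h
  exact H items _ (PySem.Dict.get?_empty n)

-- ---- pass 2: sorted2 is sorted under the lexicographic key ----

theorem pvSorted2_eq (occ : List (String × String)) :
    PySem.List.sorted2 occ Prod.fst Prod.snd false
      = PySem.List.sorted occ (fun x => (toLex x : Lex (String × String))) false := by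
  rw [PySem.List.sorted_eq_foldl_insertBy]
  unfold PySem.List.sorted2
  simp only [if_neg (by decide : ¬ (false = true))]
  have hfun : (fun (a b : String × String) =>
        decide (a.1 < b.1) || (!decide (b.1 < a.1) && decide (a.2 < b.2)))
      = (fun (a b : String × String) =>
        decide ((toLex a : Lex (String × String)) < toLex b)) := by
    funext a b
    have hiff : ((toLex a : Lex (String × String)) < toLex b)
        ↔ (a.1 < b.1 ∨ (a.1 = b.1 ∧ a.2 < b.2)) := Prod.Lex.toLex_lt_toLex
    by_cases h1 : a.1 < b.1
    · simp [h1, hiff]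
    · by_cases h2 : a.1 = b.1
      · simp [h2, hiff]
      · have h4 : b.1 < a.1 := lt_of_le_of_ne (not_lt.mp h1) (Ne.symm h2)
        simp [h1, h2, h4, hiff]
  rw [hfun]

-- ---- pass 2: the run scan collects exactly the keys with count ≥ 3 ----

theorem pvDropWhile_head_false {α : Type} (p : α → Bool) (t : List α) (r0 : α) (rs : List α)
    (h : t.dropWhile p = r0 :: rs) : p r0 = false := by
  induction t with
  | nil => cases h
  | cons a t ih =>
      rw [List.dropWhile_cons] at h
      by_cases hp : p a
      · rw [if_pos hp] at h
        exact ih h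
      · rw [if_neg hp] at h
        cases h
        exact Bool.eq_false_iff.mpr hp


theorem pvRunScan_mem_aux (n : Nat) :
    ∀ (l : List (String × String)), l.length ≤ n →
    ∀ (pages : PySem.Set (String × String)) (x : String × String),
    l.Pairwise (fun a b => (toLex a : Lex (String × String)) ≤ toLex b) →
    (x ∈ pvRunScan pages l ↔ x ∈ pages ∨ 3 ≤ l.count x) := by
  induction n with
  | zero =>
      intro l hl pages x _
      have : l = [] := List.eq_nil_of_length_eq_zero (Nat.le_zero.mp hl)
      subst this
      simp [pvRunScan]
  | succ n ih =>
      intro l hl pages x hp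
      cases l with
      | nil => simp [pvRunScan]
      | cons y t =>
          have hpt : t.Pairwise (fun a b => (toLex a : Lex (String × String)) ≤ toLex b) :=
            (List.pairwise_cons.mp hp).2
          have hyall : ∀ z ∈ t, (toLex y : Lex (String × String)) ≤ toLex z :=
            (List.pairwise_cons.mp hp).1
          have hsplit : t.takeWhile (fun z => z == y) ++ t.dropWhile (fun z => z == y) = t :=
            List.takeWhile_append_dropWhile
          have hrest_pw : (t.dropWhile (fun z => z == y)).Pairwise
              (fun a b => (toLex a : Lex (String × String)) ≤ toLex b) :=
            List.Pairwise.sublist (List.dropWhile_sublist _) hpt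
          have hrest_len : (t.dropWhile (fun z => z == y)).length ≤ n := by
            have := List.length_dropWhile_le (fun z => z == y) t
            simp only [List.length_cons] at hl
            omega
          have hrun_all : ∀ z ∈ t.takeWhile (fun z => z == y), z = y := by
            intro z hz
            have := List.mem_takeWhile_imp hz
            exact eq_of_beq this
          -- y does not occur in the rest
          have hynotin : y ∉ t.dropWhile (fun z => z == y) := by
            intro hyin
            cases hrest : t.dropWhile (fun z => z == y) with
            | nil => rw [hrest] at hyin; cases hyin
            | cons r0 rs =>
                have hr0p : ((fun z => z == y) r0) = false :=
                  pvDropWhile_head_false (fun z => z == y) t r0 rs hrest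
                have hr0' : r0 ≠ y := by
                  intro he
                  rw [he] at hr0p
                  simp at hr0p
                have hr0mem : r0 ∈ t := by
                  have hx : r0 ∈ t.dropWhile (fun z => z == y) := by
                    rw [hrest]
                    exact List.mem_cons_self
                  exact (List.dropWhile_sublist _).mem hx
                have hyr0 : (toLex y : Lex (String × String)) ≤ toLex r0 := hyall r0 hr0mem
                rw [hrest] at hyin
                rcases List.mem_cons.mp hyin with he | hyin'
                · exact hr0' he.symm
                · have hr0y : (toLex r0 : Lex (String × String)) ≤ toLex y := by
                    rw [hrest] at hrest_pw
                    exact (List.pairwise_cons.mp hrest_pw).1 y hyin'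
                  exact hr0' (toLex.injective (le_antisymm hr0y hyr0))
          have hstep : pvRunScan pages (y :: t)
              = pvRunScan
                  (if 3 ≤ 1 + (t.takeWhile (fun z => z == y)).length then
                    PySem.Set.add pages y else pages)
                  (t.dropWhile (fun z => z == y)) := by
            rw [pvRunScan]
          rw [hstep, ih _ hrest_len _ x hrest_pw]
          have hcnt : (y :: t).count x
              = (y :: t.takeWhile (fun z => z == y)).count x
                + (t.dropWhile (fun z => z == y)).count x := by
            conv_lhs => rw [show y :: t = (y :: t.takeWhile (fun z => z == y))
                ++ t.dropWhile (fun z => z == y) by rw [List.cons_append, hsplit]]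
            exact List.count_append
          by_cases hxy : x = y
          · subst hxy
            have hc0 : (t.dropWhile (fun z => z == x)).count x = 0 :=
              List.count_eq_zero.mpr hynotin
            have hcrun : (x :: t.takeWhile (fun z => z == x)).count x
                = 1 + (t.takeWhile (fun z => z == x)).length := by
              rw [List.count_cons_self]
              have hcl : (t.takeWhile (fun z => z == x)).count x
                  = (t.takeWhile (fun z => z == x)).length :=
                List.count_eq_length.mpr (fun b hb => (hrun_all b hb).symm)
              omega
            rw [hcnt, hc0, hcrun]
            by_cases h3 : 3 ≤ 1 + (t.takeWhile (fun z => z == x)).length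
            · rw [if_pos h3]
              simp only [PySem.Set.mem_add]
              constructor
              · rintro ((hh | hh) | hh)
                · exact Or.inl hh
                · right; omega
                · exfalso; omega
              · rintro (hh | hh)
                · exact Or.inl (Or.inl hh)
                · exact Or.inl (Or.inr trivial)
            · rw [if_neg h3]
              constructor
              · rintro (hh | hh)
                · exact Or.inl hh
                · exfalso; omega
              · rintro (hh | hh)
                · exact Or.inl hh
                · exfalso; omega
          · have hcrun0 : (y :: t.takeWhile (fun z => z == y)).count x = 0 := by
              apply List.count_eq_zero.mpr
              intro hxin
              rcases List.mem_cons.mp hxin with he | hxin'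
              · exact hxy he
              · exact hxy (hrun_all x hxin')
            rw [hcnt, hcrun0]
            by_cases h3 : 3 ≤ 1 + (t.takeWhile (fun z => z == y)).length
            · rw [if_pos h3]
              simp only [PySem.Set.mem_add]
              constructor
              · rintro ((hh | hh) | hh)
                · exact Or.inl hh
                · exact absurd hh hxy
                · right; omega
              · rintro (hh | hh)
                · exact Or.inl (Or.inl hh)
                · right; omega
            · rw [if_neg h3]
              constructor
              · rintro (hh | hh)
                · exact Or.inl hh
                · right; omega
              · rintro (hh | hh)
                · exact Or.inl hh
                · right; omega

theorem pvPages_contains (occ : List (String × String)) (s p : String) :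
    PySem.Set.contains (pvPages occ) (s, p) = decide (3 ≤ occ.count (s, p)) := by
  unfold pvPages
  rw [pvSorted2_eq]
  have hpw : (PySem.List.sorted occ (fun x => (toLex x : Lex (String × String))) false).Pairwise
      (fun a b => (toLex a : Lex (String × String)) ≤ toLex b) :=
    PySem.List.sorted_pairwise occ _
  have hmem := pvRunScan_mem_aux
    (PySem.List.sorted occ (fun x => (toLex x : Lex (String × String))) false).length
    _ (le_refl _) PySem.Set.empty (s, p) hpw
  have hcount : (PySem.List.sorted occ (fun x => (toLex x : Lex (String × String))) false).count (s, p)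
      = occ.count (s, p) :=
    (PySem.List.sorted_perm occ _ _).count_eq _
  rw [hcount] at hmem
  have hempty : ((s, p) ∈ (PySem.Set.empty : PySem.Set (String × String))) ↔ False := by
    simp [PySem.Set.empty]
  by_cases h : 3 ≤ occ.count (s, p)
  · rw [decide_eq_true h]
    exact (PySem.Set.contains_iff _ _).mpr (hmem.mpr (Or.inr h))
  · rw [decide_eq_false h]
    rw [Bool.eq_false_iff]
    intro hct
    rcases hmem.mp ((PySem.Set.contains_iff _ _).mp hct) with hx | hx
    · exact hempty.mp hx
    · exact h hx

-- ---- A-side: Nodup-key invariants for the nested count structure ----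

def pvSPInv (d : PySem.Dict String (PySem.Dict String Int)) : Prop :=
  d.keys.Nodup ∧ ∀ s, ((d.getD s PySem.Dict.empty).keys.Nodup)

theorem pvSPInv_step (service q : String) (d : PySem.Dict String (PySem.Dict String Int))
    (h : pvSPInv d) :
    pvSPInv (d.insert service ((d.getD service PySem.Dict.empty).modify q 0 (· + 1))) := by
  refine ⟨PySem.Dict.nodup_keys_insert _ _ _ h.1, fun s => ?_⟩
  rw [PySem.Dict.getD_insert]
  by_cases hs : s = service
  · rw [if_pos hs, PySem.Dict.keys_modify]
    exact PySem.Dict.nodup_keys_insert _ _ _ (h.2 service)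
  · rw [if_neg hs]
    exact h.2 s

theorem pvSPInv_servicePaths (items : List (String × String)) :
    pvSPInv (pvServicePaths items) := by
  unfold pvServicePaths
  have H : ∀ (l : List (String × String)) d, pvSPInv d → pvSPInv (l.foldl pvSPStep d) := by
    intro l
    induction l with
    | nil => intro d h; exact h
    | cons kv t ih =>
        intro d h
        simp only [List.foldl_cons]
        refine ih _ ?_
        unfold pvSPStep
        by_cases hn : pvIsNix kv.1
        · rw [if_pos hn]
          by_cases h4 : (pvParts kv.1).length < 4
          · rw [if_pos h4]; exact h
          · rw [if_neg h4, pvCountLoopA_eq]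
            have HH : ∀ (ks : List String) d, pvSPInv d →
                pvSPInv (ks.foldl (fun (d : PySem.Dict String (PySem.Dict String Int)) (s : String) =>
                  d.insert (pvServiceOf kv.1)
                    ((d.getD (pvServiceOf kv.1) PySem.Dict.empty).modify s 0 (· + 1))) d) := by
              intro ks
              induction ks with
              | nil => intro d h; exact h
              | cons q tt ih2 => intro d h; exact ih2 _ (pvSPInv_step _ q d h)
            exact HH _ d h
        · rw [if_neg hn]; exact h
  refine H _ _ ⟨List.nodup_nil, fun s => ?_⟩
  rw [PySem.Dict.getD_empty]
  exact List.nodup_nil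

-- ---- A-side: complex_groups membership is exactly "count ≥ 3" ----

theorem pvCGInner (sname : String) (pcs : List (String × Int))
    (cg : PySem.Dict String (PySem.Set String)) (s' p' : String) :
    (p' ∈ ((pcs.foldl (pvCGInnerStep sname) cg).getD s' PySem.Set.empty))
      ↔ (p' ∈ cg.getD s' PySem.Set.empty ∨ (s' = sname ∧ ∃ c, (p', c) ∈ pcs ∧ 3 ≤ c)) := by
  induction pcs generalizing cg with
  | nil => simp
  | cons pc t ih =>
      simp only [List.foldl_cons]
      have hsplit : (∃ c, (p', c) ∈ pc :: t ∧ 3 ≤ c)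
          ↔ ((p' = pc.1 ∧ 3 ≤ pc.2) ∨ ∃ c, (p', c) ∈ t ∧ 3 ≤ c) := by
        constructor
        · rintro ⟨c, hm, hc3⟩
          rcases List.mem_cons.mp hm with hh | hh
          · left
            refine ⟨congrArg Prod.fst hh, ?_⟩
            have h2 := congrArg Prod.snd hh
            simp only at h2
            omega
          · exact Or.inr ⟨c, hh, hc3⟩
        · rintro (⟨hp, h3⟩ | ⟨c, hm, hc3⟩)
          · refine ⟨pc.2, ?_, h3⟩
            apply List.mem_cons.mpr
            left
            rw [hp]
          · exact ⟨c, List.mem_cons_of_mem _ hm, hc3⟩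
      by_cases hc : 3 ≤ pc.2
      · rw [show pvCGInnerStep sname cg pc
              = cg.insert sname (PySem.Set.add (cg.getD sname PySem.Set.empty) pc.1) from by
            unfold pvCGInnerStep; rw [if_pos hc], ih]
        by_cases hs : s' = sname
        · subst hs
          rw [PySem.Dict.getD_insert, if_pos rfl, PySem.Set.mem_add, hsplit]
          tauto
        · rw [PySem.Dict.getD_insert, if_neg hs, hsplit]
          tauto
      · rw [show pvCGInnerStep sname cg pc = cg from by
            unfold pvCGInnerStep; rw [if_neg hc], ih, hsplit]
        have hnc : ¬ (p' = pc.1 ∧ 3 ≤ pc.2) := fun hx => hc hx.2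
        tauto

theorem pvCG_spec (items : List (String × String)) (s p : String) :
    (p ∈ ((pvComplexGroups items).getD s PySem.Set.empty))
      ↔ ∃ inner, (s, inner) ∈ (pvServicePaths items).items ∧ ∃ c, (p, c) ∈ inner.items ∧ 3 ≤ c := by
  unfold pvComplexGroups
  have H : ∀ (L : List (String × PySem.Dict String Int)) (cg : PySem.Dict String (PySem.Set String)),
      (p ∈ ((L.foldl pvCGStep cg).getD s PySem.Set.empty))
        ↔ (p ∈ cg.getD s PySem.Set.empty
            ∨ ∃ inner, (s, inner) ∈ L ∧ ∃ c, (p, c) ∈ inner.items ∧ 3 ≤ c) := by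
    intro L
    induction L with
    | nil => intro cg; simp
    | cons sp t ih =>
        intro cg
        simp only [List.foldl_cons]
        rw [ih, show pvCGStep cg sp = sp.2.items.foldl (pvCGInnerStep sp.1) cg from rfl,
            pvCGInner]
        constructor
        · rintro ((h | ⟨hs, c, hm, hc3⟩) | ⟨inner, hmem, c, hm, hc3⟩)
          · exact Or.inl h
          · refine Or.inr ⟨sp.2, ?_, c, hm, hc3⟩
            apply List.mem_cons.mpr
            left
            rw [hs]
          · exact Or.inr ⟨inner, List.mem_cons_of_mem _ hmem, c, hm, hc3⟩
        · rintro (h | ⟨inner, hmem, c, hm, hc3⟩)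
          · exact Or.inl (Or.inl h)
          · rcases List.mem_cons.mp hmem with heq | hmem'
            · refine Or.inl (Or.inr ⟨congrArg Prod.fst heq, c, ?_, hc3⟩)
              have hi : inner = sp.2 := congrArg Prod.snd heq
              rw [← hi]
              exact hm
            · exact Or.inr ⟨inner, hmem', c, hm, hc3⟩
  rw [H _ PySem.Dict.empty]
  rw [PySem.Dict.getD_empty]
  simp [PySem.Set.empty]

theorem pvCG_count (items : List (String × String)) (s p : String) :
    PySem.Set.contains ((pvComplexGroups items).getD s PySem.Set.empty) p
      = decide (3 ≤ ((pvServicePaths items).getD s PySem.Dict.empty).getD p 0) := by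
  obtain ⟨hnd, hinner⟩ := pvSPInv_servicePaths items
  have hmem : (p ∈ ((pvComplexGroups items).getD s PySem.Set.empty))
      ↔ 3 ≤ ((pvServicePaths items).getD s PySem.Dict.empty).getD p 0 := by
    rw [pvCG_spec]
    constructor
    · rintro ⟨inner, hmI, c, hmc, hc3⟩
      have hg : (pvServicePaths items).get? s = some inner :=
        PySem.Dict.get?_of_mem_items _ hmI hnd
      have hgd : (pvServicePaths items).getD s PySem.Dict.empty = inner :=
        PySem.Dict.getD_of_get?_eq_some _ _ hg
      rw [hgd]
      have hndI : inner.keys.Nodup := by rw [← hgd]; exact hinner s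
      rw [PySem.Dict.getD_of_mem_items inner hmc hndI 0]
      exact hc3
    · intro hc3
      by_cases hcs : (pvServicePaths items).contains s = true
      · obtain ⟨inner, hg⟩ : ∃ inner, (pvServicePaths items).get? s = some inner := by
          rw [PySem.Dict.contains_eq_isSome_get?] at hcs
          exact Option.isSome_iff_exists.mp hcs
        have hgd : (pvServicePaths items).getD s PySem.Dict.empty = inner :=
          PySem.Dict.getD_of_get?_eq_some _ _ hg
        rw [hgd] at hc3
        by_cases hcp : inner.contains p = true
        · obtain ⟨c, hgc⟩ : ∃ c, inner.get? p = some c := by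
            rw [PySem.Dict.contains_eq_isSome_get?] at hcp
            exact Option.isSome_iff_exists.mp hcp
          refine ⟨inner, PySem.Dict.mem_items_of_get?_eq_some _ hg, c,
            PySem.Dict.mem_items_of_get?_eq_some _ hgc, ?_⟩
          rw [← PySem.Dict.getD_of_get?_eq_some _ (0:Int) hgc]
          exact hc3
        · have hcp' : inner.contains p = false := by
            cases hx : inner.contains p
            · rfl
            · exact absurd hx hcp
          rw [PySem.Dict.getD_of_not_contains _ _ hcp'] at hc3
          omega
      · have hcs' : (pvServicePaths items).contains s = false := by
          cases hx : (pvServicePaths items).contains s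
          · rfl
          · exact absurd hx hcs
        rw [PySem.Dict.getD_of_not_contains _ _ hcs', PySem.Dict.getD_empty] at hc3
        omega
  by_cases h : 3 ≤ ((pvServicePaths items).getD s PySem.Dict.empty).getD p 0
  · rw [decide_eq_true h]
    unfold PySem.Set.contains
    exact List.contains_iff_mem.mpr (hmem.mpr h)
  · rw [decide_eq_false h]
    unfold PySem.Set.contains
    rw [Bool.eq_false_iff]
    intro hct
    exact h (hmem.mp (List.contains_iff_mem.mp hct))

-- ---- A-side: every nixflix option's service is discovered ----

theorem pvServices_mono (x : String) (t : List (String × String)) (s0 : PySem.Set String)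
    (hx : x ∈ s0) : x ∈ t.foldl pvDSStep s0 := by
  induction t generalizing s0 with
  | nil => exact hx
  | cons kv t ih =>
      simp only [List.foldl_cons]
      apply ih
      unfold pvDSStep
      by_cases hn : pvIsNix kv.1
      · rw [if_pos hn]
        by_cases h2 : 2 ≤ (pvParts kv.1).length
        · rw [if_pos h2]; exact (PySem.Set.mem_add _ _ _).mpr (Or.inl hx)
        · rw [if_neg h2]; exact hx
      · rw [if_neg hn]; exact hx

theorem pvServices_mem (items : List (String × String)) (kv : String × String)
    (h : kv ∈ items) (h1 : pvIsNix kv.1 = true) (h2 : 2 ≤ (pvParts kv.1).length) :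
    (pvDiscoverServices items).contains (pvServiceOf kv.1) = true := by
  unfold pvDiscoverServices
  rw [List.contains_iff_mem, PySem.List.mem_sorted]
  have H : ∀ (t : List (String × String)) (s0 : PySem.Set String), kv ∈ t →
      pvServiceOf kv.1 ∈ t.foldl pvDSStep s0 := by
    intro t
    induction t with
    | nil => intro s0 hh; cases hh
    | cons kv' t ih =>
        intro s0 hh
        simp only [List.foldl_cons]
        rcases List.mem_cons.mp hh with hh | hh
        · subst hh
          apply pvServices_mono
          unfold pvDSStep
          rw [if_pos h1, if_pos h2]
          exact (PySem.Set.mem_add _ _ _).mpr (Or.inr rfl)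
        · exact ih _ hh
  exact H items PySem.Set.empty h

-- ---- name.split(".") has at least 2 parts for a "nixflix."-prefixed name ----

theorem pvGo_len (sep : List Char) (fuel : Nat) (l cur : List Char) (acc : List (List Char)) :
    acc.length + 1 ≤ (PySem.Chars.splitOn.go sep fuel l cur acc).length := by
  induction fuel generalizing l cur acc with
  | zero => simp [PySem.Chars.splitOn.go]
  | succ f ih =>
      cases l with
      | nil => simp [PySem.Chars.splitOn.go]
      | cons c rest =>
          simp only [PySem.Chars.splitOn.go]
          split
          · have hh := ih (List.drop sep.length (c :: rest)) [] (cur.reverse :: acc)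
            simp only [List.length_cons] at hh
            omega
          · exact ih rest (c :: cur) acc

theorem pvGo_len2 (fuel : Nat) (l cur : List Char) (acc : List (List Char))
    (hf : l.length ≤ fuel) (hm : ('.' : Char) ∈ l) :
    acc.length + 2 ≤ (PySem.Chars.splitOn.go ['.'] fuel l cur acc).length := by
  induction fuel generalizing l cur acc with
  | zero =>
      have hz : l = [] := List.eq_nil_of_length_eq_zero (Nat.le_zero.mp hf)
      subst hz; cases hm
  | succ f ih =>
      cases l with
      | nil => cases hm
      | cons c rest =>
          simp only [PySem.Chars.splitOn.go]
          split
          · have hh := pvGo_len ['.'] f (List.drop ['.'].length (c :: rest)) [] (cur.reverse :: acc)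
            simp only [List.length_cons, List.length_nil, Nat.zero_add] at hh ⊢
            omega
          · rename_i hpre
            have hcne : c ≠ '.' := by
              intro hce
              apply hpre
              subst hce
              simp [List.isPrefixOf]
            have hm' : ('.' : Char) ∈ rest := by
              rcases List.mem_cons.mp hm with hh | hh
              · exact absurd hh.symm hcne
              · exact hh
            exact ih rest (c :: cur) acc (by
              simp only [List.length_cons] at hf
              omega) hm'

theorem pvParts_len (name : String) (h : pvIsNix name = true) : 2 ≤ (pvParts name).length := by
  have hdot : ('.' : Char) ∈ name.toList := by
    unfold pvIsNix at h
    rw [PySem.Str.startswith_eq] at h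
    obtain ⟨t, ht⟩ := (PySem.Chars.startswith_iff _ _).mp h
    rw [← ht]
    apply List.mem_append_left
    decide
  unfold pvParts
  have hsep : (".".toList) = ['.'] := by decide
  rw [PySem.Str.split?]
  simp only [PySem.Chars.split?, hsep, List.isEmpty_cons, Bool.false_eq_true, if_false,
    Option.map_some, Option.getD_some, List.length_map]
  unfold PySem.Chars.splitOn
  exact pvGo_len2 (name.toList.length + 1) name.toList [] [] (by omega) hdot

-- ---- per-item page agreement and main assembly ----

theorem pvAppendPage_eq (cat : PySem.Dict String (PySem.Dict String (List (String × String))))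
    (service pageKey : String) (kv : String × String) :
    pvAppendPage cat service pageKey kv = pvAppend cat service pageKey kv := by
  unfold pvAppendPage
  by_cases hk : (pageKey == "index") = true
  · rw [if_pos hk, show pageKey = "index" from by simpa using hk]
  · rw [if_neg hk]

theorem pvPageLoopA_eq (cg : PySem.Set String) (parts : List String) :
    pvPageLoopA cg parts
      = (pvPfxs ((parts.drop 2).dropLast)).foldl
          (fun pk s => if PySem.Set.contains cg s then s else pk) "index" := by
  unfold pvPageLoopA
  exact pvARange_eq (fun (pk : String) (s : String) =>
    if PySem.Set.contains cg s then s else pk) parts "index"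

-- a last-match fold is a find? on the reversed list
theorem pvFoldl_last_find (p : String → Bool) (l : List String) (d : String) :
    l.foldl (fun pk s => if p s then s else pk) d = (l.reverse.find? p).getD d := by
  induction l using List.reverseRecOn with
  | nil => rfl
  | append_singleton l x ih =>
      rw [List.foldl_append, List.reverse_append]
      simp only [List.foldl_cons, List.foldl_nil, List.reverse_cons, List.reverse_nil,
        List.nil_append, List.cons_append, List.find?_cons]
      by_cases h : p x
      · simp [h]
      · simp [h, ih]

theorem pvIntBeq2 (n : Nat) : ((((n : Nat) : Int)) == (2 : Int)) = (n == 2) := by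
  by_cases h : n = 2
  · subst h; rfl
  · have h1 : ((((n : Nat) : Int)) == (2 : Int)) = false := by
      simp only [beq_eq_false_iff_ne, ne_eq]
      exact_mod_cast h
    have h2 : (n == 2) = false := by
      simp only [beq_eq_false_iff_ne, ne_eq]
      exact h
    rw [h1, h2]

theorem pvPlace_eq (items : List (String × String))
    (cat : PySem.Dict String (PySem.Dict String (List (String × String))))
    (kv : String × String) (hkv : kv ∈ items) :
    pvPlaceA (pvDiscoverServices items) (pvComplexGroups items) cat kv
      = pvPlaceB (pvPass1 items).2 (pvPages (pvPass1 items).1) cat kv := by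
  unfold pvPlaceA pvPlaceB
  by_cases hn : pvIsNix kv.1
  case neg =>
    rw [if_neg hn, pvMeta_get_none items kv.1 (by
      cases hx : pvIsNix kv.1
      · rfl
      · exact absurd hx hn)]
  rw [if_pos hn, pvMeta_get_some items kv hkv hn]
  simp only [pvMetaOf_eq]
  rw [pvIntBeq2]
  by_cases h2 : ((pvParts kv.1).length == 2) = true
  · rw [if_pos h2, if_pos h2]
  rw [if_neg h2, if_neg h2]
  have hlen2 : 2 ≤ (pvParts kv.1).length := pvParts_len kv.1 hn
  have hlen3 : 3 ≤ (pvParts kv.1).length := by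
    rcases Nat.lt_or_ge ((pvParts kv.1).length) 3 with hlt | hge
    · exfalso
      have hx : (pvParts kv.1).length = 2 := by omega
      simp [hx] at h2
    · exact hge
  rw [if_pos (pvServices_mem items kv hkv hn hlen2)]
  -- the two membership tests agree pointwise
  have hG : ∀ q, PySem.Set.contains ((pvComplexGroups items).getD (pvServiceOf kv.1) PySem.Set.empty) q
      = PySem.Set.contains (pvPages (pvPass1 items).1) (pvServiceOf kv.1, q) := by
    intro q
    rw [pvCG_count items (pvServiceOf kv.1) q, pvCounts_occ items (pvServiceOf kv.1) q,
        pvPages_contains]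
    have : ((3:Int) ≤ (((pvPass1 items).1.count (pvServiceOf kv.1, q) : Nat) : Int))
        ↔ 3 ≤ (pvPass1 items).1.count (pvServiceOf kv.1, q) := by
      exact_mod_cast Iff.rfl
    exact decide_eq_decide.mpr this
  have hA : pvPageLoopA ((pvComplexGroups items).getD (pvServiceOf kv.1) PySem.Set.empty) (pvParts kv.1)
      = ((pvPfxs (((pvParts kv.1).drop 2).dropLast)).reverse.find?
          (fun c => PySem.Set.contains (pvPages (pvPass1 items).1) (pvServiceOf kv.1, c))).getD
        "index" := by
    rw [pvPageLoopA_eq,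
        pvFoldl_last_find (fun s =>
          PySem.Set.contains ((pvComplexGroups items).getD (pvServiceOf kv.1) PySem.Set.empty) s)]
    rw [show (fun s => PySem.Set.contains
          ((pvComplexGroups items).getD (pvServiceOf kv.1) PySem.Set.empty) s)
        = (fun c => PySem.Set.contains (pvPages (pvPass1 items).1) (pvServiceOf kv.1, c)) from
      funext hG]
  rw [pvTail_eq kv.1]
  by_cases hoe : (((pvParts kv.1).drop 2).filter pvKeep).isEmpty = true
  · rw [if_pos hoe]
    have hfe : ((pvParts kv.1).drop 2).filter pvKeep = ([] : List String) := by
      simpa using hoe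
    rw [hfe, pvJoin_nil]
    simp only [bne_self_eq_false, Bool.false_and, if_neg (by decide : ¬ (false = true))]
    rw [pvAppendPage_eq, hA]
  · rw [if_neg hoe]
    by_cases hop : (PySem.Str.join "." (((pvParts kv.1).drop 2).filter pvKeep) != "") = true
    · rw [if_pos hop, hG (PySem.Str.join "." (((pvParts kv.1).drop 2).filter pvKeep))]
      by_cases hq : PySem.Set.contains (pvPages (pvPass1 items).1)
          (pvServiceOf kv.1, PySem.Str.join "." (((pvParts kv.1).drop 2).filter pvKeep)) = true
      · rw [if_pos hq, if_pos (by rw [hop, hq]; rfl)]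
      · have hq' : PySem.Set.contains (pvPages (pvPass1 items).1)
            (pvServiceOf kv.1, PySem.Str.join "." (((pvParts kv.1).drop 2).filter pvKeep)) = false := by
          cases hx : PySem.Set.contains (pvPages (pvPass1 items).1)
              (pvServiceOf kv.1, PySem.Str.join "." (((pvParts kv.1).drop 2).filter pvKeep))
          · rfl
          · exact absurd hx hq
        rw [hq', if_neg (by decide : ¬ (false = true)), if_neg (by simp), pvAppendPage_eq, hA]
    · have hop' : (PySem.Str.join "." (((pvParts kv.1).drop 2).filter pvKeep) != "") = false := by
        cases hx : (PySem.Str.join "." (((pvParts kv.1).drop 2).filter pvKeep) != "")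
        · rfl
        · exact absurd hx hop
      rw [if_neg hop, if_neg (by rw [hop']; simp), pvAppendPage_eq, hA]

theorem pv_main (options : List (String × String)) :
    categorize_options_hierarchical options = categorize_options_hierarchical_alt options := by
  unfold categorize_options_hierarchical categorize_options_hierarchical_alt
  have h : ((PySem.Dict.ofList options).items).foldl
        (pvPlaceA (pvDiscoverServices ((PySem.Dict.ofList options).items))
                  (pvComplexGroups ((PySem.Dict.ofList options).items)))
        PySem.Dict.empty
      = ((PySem.Dict.ofList options).items).foldl
        (pvPlaceB (pvPass1 ((PySem.Dict.ofList options).items)).2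
                  (pvPages (pvPass1 ((PySem.Dict.ofList options).items)).1))
        PySem.Dict.empty :=
    PySem.List.foldl_congr_mem _ _ _ PySem.Dict.empty
      (fun cat kv hkv => pvPlace_eq _ cat kv hkv)
  rw [h]

-- ===== VERDICT (by name: the statement is the Claim_ definition above) =====
theorem categorize_options_hierarchical_spec : Claim_equal_categorize_options_hierarchical := by
  intro options _
  unfold Spec_categorize_options_hierarchical
  exact pv_main options
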